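-- pv_equiv track=rewrite | github.com/Kowalskk/prophetlabs | main.py | _subjects_related
-- ===== SOURCE A (Python) =====
-- def _subjects_related(s1: str, s2: str) -> bool:
--     """Check if two subjects are semantically related (broader than exact match).
--     e.g. 'nhl' and 'nhl' → True
--          'nba' and 'nba' → True
--          'ucl' and 'ucl' → True
--          'nhl' and 'nba' → False
--     Also handles cases where one is generic or a category.
--     """
--     if s1 == s2: return True
--     # Sports leagues share same sport categories
--     RELATED = {
--         frozenset({"ucl", "laliga", "epl"}),  # European football
--         frozenset({"bitcoin", "btc_updown"}),
--         frozenset({"ethereum", "eth_updown"}),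
--         frozenset({"bnb", "bnb_updown"}),
--         frozenset({"ipo_event", "cerebras", "stripe", "databricks", "klarna"}),
--     }
--     pair = frozenset({s1, s2})
--     for group in RELATED:
--         if s1 in group and s2 in group:
--             return True
--     return False
-- ===== SOURCE B (Python) =====
-- _GROUPS = [
--     ["ucl", "laliga", "epl"],
--     ["bitcoin", "btc_updown"],
--     ["ethereum", "eth_updown"],
--     ["bnb", "bnb_updown"],
--     ["ipo_event", "cerebras", "stripe", "databricks", "klarna"],
-- ]
-- _MEMBERS = {m: i for i, grp in enumerate(_GROUPS) for m in grp}
--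
-- def _subjects_related(s1: str, s2: str) -> bool:
--     if s1 == s2:
--         return True
--     g1 = _MEMBERS.get(s1)
--     return g1 is not None and g1 == _MEMBERS.get(s2)
-- ===== Notes on version B (the rewrite author's own statement) =====
-- stated objective: idiomatic
-- what changed: Replaces the per-group membership loop with a flat member-to-group-index dict built once at module load; the function becomes two O(1) lookups and a comparison.
import Mathlib
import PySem

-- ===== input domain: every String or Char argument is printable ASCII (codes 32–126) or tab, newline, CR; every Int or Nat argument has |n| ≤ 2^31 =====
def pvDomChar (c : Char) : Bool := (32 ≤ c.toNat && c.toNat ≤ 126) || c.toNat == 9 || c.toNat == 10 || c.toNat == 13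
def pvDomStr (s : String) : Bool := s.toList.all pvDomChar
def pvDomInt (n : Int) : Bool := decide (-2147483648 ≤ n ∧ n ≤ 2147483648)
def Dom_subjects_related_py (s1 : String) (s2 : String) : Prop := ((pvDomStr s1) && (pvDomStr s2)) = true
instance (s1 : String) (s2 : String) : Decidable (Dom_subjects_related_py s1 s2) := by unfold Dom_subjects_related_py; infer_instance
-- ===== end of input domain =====

-- B replaces A's per-group membership loop with a flat member→group-index map built once; the call is two lookups and a comparison (objective: idiomatic).

-- ===== PORT A =====
-- the RELATED set of frozensets (iteration order is irrelevant: the loop only tests membership and returns True)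
def pvRelatedA : List (List String) :=
  [["ucl", "laliga", "epl"],
   ["bitcoin", "btc_updown"],
   ["ethereum", "eth_updown"],
   ["bnb", "bnb_updown"],
   ["ipo_event", "cerebras", "stripe", "databricks", "klarna"]]

-- the 'for group in RELATED: if s1 in group and s2 in group: return True' loop
def pvLoopA (s1 s2 : String) : List (List String) → Bool
  | [] => false
  | g :: rest => if g.contains s1 && g.contains s2 then true else pvLoopA s1 s2 rest

def subjects_related_py (s1 : String) (s2 : String) : Bool :=
  if s1 == s2 then true else pvLoopA s1 s2 pvRelatedA

-- ===== PORT B =====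
def pvGroupsB : List (List String) :=
  [["ucl", "laliga", "epl"],
   ["bitcoin", "btc_updown"],
   ["ethereum", "eth_updown"],
   ["bnb", "bnb_updown"],
   ["ipo_event", "cerebras", "stripe", "databricks", "klarna"]]

-- _MEMBERS = {m: i for i, grp in enumerate(_GROUPS) for m in grp}  (built once at module load)
def pvMembersB : PySem.Dict String Int :=
  (PySem.List.enumerate pvGroupsB).foldl
    (fun d ig => ig.2.foldl (fun d m => d.insert m ig.1) d) PySem.Dict.empty

-- g1 = _MEMBERS.get(s1); return g1 is not None and g1 == _MEMBERS.get(s2)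
def subjects_related_py_alt (s1 : String) (s2 : String) : Bool :=
  if s1 == s2 then true
  else
    match pvMembersB.get? s1 with
    | none => false
    | some g1 => some g1 == pvMembersB.get? s2

-- ===== PRECONDITION & SPEC =====
def Spec_subjects_related_py (s1 : String) (s2 : String) (out : Bool) : Prop := out = subjects_related_py_alt s1 s2
instance (s1 : String) (s2 : String) (out : Bool) : Decidable (Spec_subjects_related_py s1 s2 out) := by unfold Spec_subjects_related_py; infer_instance

-- ===== CLAIM (what is proved, stated in full; the proofs are below) =====
def Claim_equal_subjects_related_py : Prop := ∀ (s1 : String) (s2 : String), Dom_subjects_related_py s1 s2 → Spec_subjects_related_py s1 s2 (subjects_related_py s1 s2)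

-- ===== LEMMAS AND PROOFS =====
-- all strings occurring in any group
def pvAll : List String :=
  ["ucl", "laliga", "epl", "bitcoin", "btc_updown", "ethereum", "eth_updown",
   "bnb", "bnb_updown", "ipo_event", "cerebras", "stripe", "databricks", "klarna"]

theorem pv_members_eval : pvMembersB = PySem.Dict.mk
    [("ucl",0),("laliga",0),("epl",0),("bitcoin",1),("btc_updown",1),("ethereum",2),
     ("eth_updown",2),("bnb",3),("bnb_updown",3),("ipo_event",4),("cerebras",4),
     ("stripe",4),("databricks",4),("klarna",4)] := by decide

theorem pv_get_none (s : String) (h : s ∉ pvAll) : pvMembersB.get? s = none := by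
  simp only [pvAll, List.mem_cons, not_or] at h
  obtain ⟨h1,h2,h3,h4,h5,h6,h7,h8,h9,h10,h11,h12,h13,h14,-⟩ := h
  simp [pv_members_eval, PySem.Dict.get?, Ne.symm h1, Ne.symm h2, Ne.symm h3, Ne.symm h4,
    Ne.symm h5, Ne.symm h6, Ne.symm h7, Ne.symm h8, Ne.symm h9, Ne.symm h10, Ne.symm h11,
    Ne.symm h12, Ne.symm h13, Ne.symm h14]

theorem pv_loop_none_left (s1 s2 : String) (h : s1 ∉ pvAll) :
    pvLoopA s1 s2 pvRelatedA = false := by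
  simp only [pvAll, List.mem_cons, not_or] at h
  obtain ⟨h1,h2,h3,h4,h5,h6,h7,h8,h9,h10,h11,h12,h13,h14,-⟩ := h
  simp [pvLoopA, pvRelatedA, h1, h2, h3, h4, h5, h6, h7, h8, h9, h10, h11, h12, h13, h14]

theorem pv_loop_none_right (s1 s2 : String) (h : s2 ∉ pvAll) :
    pvLoopA s1 s2 pvRelatedA = false := by
  simp only [pvAll, List.mem_cons, not_or] at h
  obtain ⟨h1,h2,h3,h4,h5,h6,h7,h8,h9,h10,h11,h12,h13,h14,-⟩ := h
  simp [pvLoopA, pvRelatedA, h1, h2, h3, h4, h5, h6, h7, h8, h9, h10, h11, h12, h13, h14]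

theorem pv_table : pvAll.all
    (fun a => pvAll.all (fun b => subjects_related_py a b == subjects_related_py_alt a b)) = true := by
  decide

theorem pv_key (s1 s2 : String) : subjects_related_py s1 s2 = subjects_related_py_alt s1 s2 := by
  by_cases h12 : s1 = s2
  · simp [subjects_related_py, subjects_related_py_alt, h12]
  · by_cases hb1 : s1 ∈ pvAll
    · by_cases hb2 : s2 ∈ pvAll
      · have h := List.all_eq_true.mp (List.all_eq_true.mp pv_table s1 hb1) s2 hb2
        exact eq_of_beq h
      · simp only [subjects_related_py, subjects_related_py_alt, beq_iff_eq, if_neg h12]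
        rw [pv_loop_none_right s1 s2 hb2, pv_get_none s2 hb2]
        cases pvMembersB.get? s1 <;> simp
    · simp only [subjects_related_py, subjects_related_py_alt, beq_iff_eq, if_neg h12]
      rw [pv_loop_none_left s1 s2 hb1, pv_get_none s1 hb1]

-- ===== VERDICT (by name: the statement is the Claim_ definition above) =====
theorem subjects_related_py_spec : Claim_equal_subjects_related_py := by
  intro s1 s2 _
  exact pv_key s1 s2
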